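-- pv_equiv track=rewrite | github.com/Jcrasto/lichess_analysis | v2/backend/review_generator.py | _material_after_blunder
-- ===== SOURCE A (Python) =====
-- from typing import Optional
--
-- def _material_after_blunder(blunder_mn: int, material_map: dict,
--                              is_white: bool, sorted_mns: list,
--                              window: int = 15) -> Optional[dict]:
--     """
--     Returns a dict with per-side counts and edge ranges for the `window`
--     half-moves following a blunder:
--       user_count / opp_count: half-moves each side held material advantage
--       user_min_edge / user_max_edge: range of user's lead when they were ahead
--       opp_min_edge / opp_max_edge: range of opponent's lead when they were ahead
--       window: total half-moves examined
--     Returns None if no subsequent data.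
--     """
--     subsequent = [mn for mn in sorted_mns
--                   if blunder_mn < mn <= blunder_mn + window]
--     if not subsequent:
--         return None
--     user_balances = [(material_map[mn] if is_white else -material_map[mn])
--                      for mn in subsequent]
--     user_ahead = [b for b in user_balances if b > 0]
--     opp_ahead  = [-b for b in user_balances if b < 0]
--     return {
--         "user_count":    len(user_ahead),
--         "opp_count":     len(opp_ahead),
--         "user_min_edge": min(user_ahead) if user_ahead else 0,
--         "user_max_edge": max(user_ahead) if user_ahead else 0,
--         "opp_min_edge":  min(opp_ahead)  if opp_ahead  else 0,
--         "opp_max_edge":  max(opp_ahead)  if opp_ahead  else 0,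
--         "window":        len(subsequent),
--     }
-- ===== SOURCE B (Python) =====
-- def _material_after_blunder(blunder_mn: int, material_map: dict,
--                              is_white: bool, sorted_mns: list,
--                              window: int = 15):
--     # One pass with running accumulators instead of building the
--     # subsequent / balances / user_ahead / opp_ahead intermediate lists.
--     sign = 1 if is_white else -1
--     lo, hi = blunder_mn, blunder_mn + window
--     total = uc = oc = 0
--     umin = umax = omin = omax = None
--     for mn in sorted_mns:
--         if lo < mn <= hi:
--             total += 1
--             b = sign * material_map[mn]
--             if b > 0:
--                 uc += 1
--                 umin = b if umin is None or b < umin else umin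
--                 umax = b if umax is None or umax < b else umax
--             elif b < 0:
--                 e = -b
--                 oc += 1
--                 omin = e if omin is None or e < omin else omin
--                 omax = e if omax is None or omax < e else omax
--     if total == 0:
--         return None
--     return {
--         "user_count":    uc,
--         "opp_count":     oc,
--         "user_min_edge": 0 if umin is None else umin,
--         "user_max_edge": 0 if umax is None else umax,
--         "opp_min_edge":  0 if omin is None else omin,
--         "opp_max_edge":  0 if omax is None else omax,
--         "window":        total,
--     }
-- ===== Notes on version B (the rewrite author's own statement) =====
-- stated objective: alternative
-- what changed: Replaces A's five intermediate list comprehensions (subsequent, balances, user_ahead, opp_ahead plus min/max scans) by a single pass over sorted_mns maintaining running counts and running min/max accumulators.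
import Mathlib
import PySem

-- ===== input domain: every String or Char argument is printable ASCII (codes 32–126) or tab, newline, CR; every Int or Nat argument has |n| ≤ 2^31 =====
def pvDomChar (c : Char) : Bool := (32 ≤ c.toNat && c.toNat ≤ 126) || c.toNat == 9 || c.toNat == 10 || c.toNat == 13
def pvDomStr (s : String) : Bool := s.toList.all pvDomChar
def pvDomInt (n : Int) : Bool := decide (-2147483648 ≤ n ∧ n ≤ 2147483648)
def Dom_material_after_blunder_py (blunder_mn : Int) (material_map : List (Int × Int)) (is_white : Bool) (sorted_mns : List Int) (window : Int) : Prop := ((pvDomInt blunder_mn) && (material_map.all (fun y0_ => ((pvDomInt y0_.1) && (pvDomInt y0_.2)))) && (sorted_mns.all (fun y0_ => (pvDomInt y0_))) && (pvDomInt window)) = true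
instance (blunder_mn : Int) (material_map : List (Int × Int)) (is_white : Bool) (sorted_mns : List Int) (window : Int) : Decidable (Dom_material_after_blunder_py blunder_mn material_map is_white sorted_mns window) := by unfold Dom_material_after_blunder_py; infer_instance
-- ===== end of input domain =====

-- B replaces A's five intermediate list comprehensions by a single pass over
-- sorted_mns with running count and min/max accumulators (alternative, same O(n) cost).


-- ===== PORT A =====
-- material_map[mn]: first-match association-list lookup; the default 0 is never
-- reached under Pre_ (the key is present); Python raises KeyError there (excluded by Pre_).
def pvLookupD (m : List (Int × Int)) (k : Int) : Int :=
  match m.find? (fun p => p.1 == k) with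
  | some p => p.2
  | none => 0

def material_after_blunder_py (blunder_mn : Int) (material_map : List (Int × Int)) (is_white : Bool) (sorted_mns : List Int) (window : Int) : Option (List (String × Int)) :=
  let subsequent := sorted_mns.filter (fun mn => decide (blunder_mn < mn ∧ mn ≤ blunder_mn + window))
  if subsequent = [] then none else
  let user_balances := subsequent.map (fun mn => if is_white then pvLookupD material_map mn else -(pvLookupD material_map mn))
  let user_ahead := user_balances.filter (fun b => decide (0 < b))
  let opp_ahead := (user_balances.filter (fun b => decide (b < 0))).map (fun b => -b)
  some [("user_count", (user_ahead.length : Int)),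
        ("opp_count", (opp_ahead.length : Int)),
        ("user_min_edge", match PySem.List.min? user_ahead (fun x => x) with | some m => m | none => 0),
        ("user_max_edge", match PySem.List.max? user_ahead (fun x => x) with | some m => m | none => 0),
        ("opp_min_edge", match PySem.List.min? opp_ahead (fun x => x) with | some m => m | none => 0),
        ("opp_max_edge", match PySem.List.max? opp_ahead (fun x => x) with | some m => m | none => 0),
        ("window", (subsequent.length : Int))]

-- ===== PORT B =====
structure PvSt where
  total : Int
  uc : Int
  oc : Int
  umin : Option Int
  umax : Option Int
  omin : Option Int
  omax : Option Int
deriving Repr, DecidableEq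

def pvMinAcc (acc : Option Int) (b : Int) : Int :=
  match acc with | none => b | some m => if b < m then b else m

def pvMaxAcc (acc : Option Int) (b : Int) : Int :=
  match acc with | none => b | some m => if m < b then b else m

def pvStep (is_white : Bool) (material_map : List (Int × Int)) (lo hi : Int) (st : PvSt) (mn : Int) : PvSt :=
  if lo < mn ∧ mn ≤ hi then
    let b := (if is_white then 1 else -1) * pvLookupD material_map mn
    if 0 < b then
      { st with total := st.total + 1, uc := st.uc + 1,
                umin := some (pvMinAcc st.umin b), umax := some (pvMaxAcc st.umax b) }
    else if b < 0 then
      let e := -b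
      { st with total := st.total + 1, oc := st.oc + 1,
                omin := some (pvMinAcc st.omin e), omax := some (pvMaxAcc st.omax e) }
    else { st with total := st.total + 1 }
  else st

def material_after_blunder_py_alt (blunder_mn : Int) (material_map : List (Int × Int)) (is_white : Bool) (sorted_mns : List Int) (window : Int) : Option (List (String × Int)) :=
  let st := sorted_mns.foldl (pvStep is_white material_map blunder_mn (blunder_mn + window)) ⟨0, 0, 0, none, none, none, none⟩
  if st.total = 0 then none else
  some [("user_count", st.uc),
        ("opp_count", st.oc),
        ("user_min_edge", st.umin.getD 0),
        ("user_max_edge", st.umax.getD 0),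
        ("opp_min_edge", st.omin.getD 0),
        ("opp_max_edge", st.omax.getD 0),
        ("window", st.total)]

-- ===== PRECONDITION & SPEC =====
-- Pre_ excludes only inputs where Python A raises KeyError: some mn in the window
-- after the blunder has no entry in material_map (B raises there too).
def Pre_material_after_blunder_py (blunder_mn : Int) (material_map : List (Int × Int)) (is_white : Bool) (sorted_mns : List Int) (window : Int) : Prop :=
  ∀ mn ∈ sorted_mns, blunder_mn < mn → mn ≤ blunder_mn + window → mn ∈ material_map.map Prod.fst
instance (blunder_mn : Int) (material_map : List (Int × Int)) (is_white : Bool) (sorted_mns : List Int) (window : Int) : Decidable (Pre_material_after_blunder_py blunder_mn material_map is_white sorted_mns window) := by unfold Pre_material_after_blunder_py; infer_instance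

def pvWitness_material_after_blunder_py : Int × (List (Int × Int)) × Bool × List Int × Int := (0, [(1, 3)], true, [1], 15)

def Spec_material_after_blunder_py (blunder_mn : Int) (material_map : List (Int × Int)) (is_white : Bool) (sorted_mns : List Int) (window : Int) (out : Option (List (String × Int))) : Prop := out = material_after_blunder_py_alt blunder_mn material_map is_white sorted_mns window
instance (blunder_mn : Int) (material_map : List (Int × Int)) (is_white : Bool) (sorted_mns : List Int) (window : Int) (out : Option (List (String × Int))) : Decidable (Spec_material_after_blunder_py blunder_mn material_map is_white sorted_mns window out) := by unfold Spec_material_after_blunder_py; infer_instance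

-- ===== CLAIM (what is proved, stated in full; the proofs are below) =====
def Claim_equal_material_after_blunder_py : Prop := ∀ (blunder_mn : Int) (material_map : List (Int × Int)) (is_white : Bool) (sorted_mns : List Int) (window : Int), Dom_material_after_blunder_py blunder_mn material_map is_white sorted_mns window → Pre_material_after_blunder_py blunder_mn material_map is_white sorted_mns window → Spec_material_after_blunder_py blunder_mn material_map is_white sorted_mns window (material_after_blunder_py blunder_mn material_map is_white sorted_mns window)

-- ===== LEMMAS AND PROOFS =====

-- abstract state of B's fold after consuming a list of user balances
def pvMk (bal : List Int) : PvSt :=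
  { total := (bal.length : Int),
    uc := ((bal.filter (fun b => decide (0 < b))).length : Int),
    oc := ((bal.filter (fun b => decide (b < 0))).length : Int),
    umin := PySem.List.min? (bal.filter (fun b => decide (0 < b))) (fun x => x),
    umax := PySem.List.max? (bal.filter (fun b => decide (0 < b))) (fun x => x),
    omin := PySem.List.min? ((bal.filter (fun b => decide (b < 0))).map (fun b => -b)) (fun x => x),
    omax := PySem.List.max? ((bal.filter (fun b => decide (b < 0))).map (fun b => -b)) (fun x => x) }

lemma min?_append_singleton (ys : List Int) (b : Int) :
    PySem.List.min? (ys ++ [b]) (fun x => x) =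
      some (pvMinAcc (PySem.List.min? ys (fun x => x)) b) := by
  cases ys with
  | nil => rfl
  | cons y t =>
    rw [List.cons_append, PySem.List.min?_id_cons, PySem.List.min?_id_cons, List.foldl_append]
    simp only [List.foldl_cons, List.foldl_nil, pvMinAcc]
    congr 1
    rcases lt_or_ge b (t.foldl min y) with h | h
    · rw [if_pos h, min_eq_right h.le]
    · rw [if_neg (not_lt.mpr h), min_eq_left h]

lemma max?_append_singleton (ys : List Int) (b : Int) :
    PySem.List.max? (ys ++ [b]) (fun x => x) =
      some (pvMaxAcc (PySem.List.max? ys (fun x => x)) b) := by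
  cases ys with
  | nil => rfl
  | cons y t =>
    rw [List.cons_append, PySem.List.max?_id_cons, PySem.List.max?_id_cons, List.foldl_append]
    simp only [List.foldl_cons, List.foldl_nil, pvMaxAcc]
    congr 1
    rcases lt_or_ge (t.foldl max y) b with h | h
    · rw [if_pos h, max_eq_right h.le]
    · rw [if_neg (not_lt.mpr h), max_eq_left h]

lemma step_mk_in (iw : Bool) (mm : List (Int × Int)) (lo hi : Int) (bal : List Int) (mn : Int)
    (h : lo < mn ∧ mn ≤ hi) :
    pvStep iw mm lo hi (pvMk bal) mn = pvMk (bal ++ [(if iw then 1 else -1) * pvLookupD mm mn]) := by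
  set b := (if iw then 1 else -1) * pvLookupD mm mn with hb
  have hfpos : (bal ++ [b]).filter (fun x => decide (0 < x)) =
      bal.filter (fun x => decide (0 < x)) ++ (if 0 < b then [b] else []) := by
    simp [List.filter_append]; split_ifs with h1 <;> simp [h1]
  have hfneg : (bal ++ [b]).filter (fun x => decide (x < 0)) =
      bal.filter (fun x => decide (x < 0)) ++ (if b < 0 then [b] else []) := by
    simp [List.filter_append]; split_ifs with h1 <;> simp [h1]
  rcases lt_trichotomy b 0 with hbs | hbs | hbs
  · have h1 : ¬ (0 < b) := by omega
    simp only [pvStep, if_pos h, ← hb, if_neg h1, if_pos hbs, pvMk]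
    simp [hfpos, hfneg, hbs, h1, min?_append_singleton, max?_append_singleton]
  · have h1 : ¬ (0 < b) := by omega
    have h2 : ¬ (b < 0) := by omega
    simp only [pvStep, if_pos h, ← hb, if_neg h1, if_neg h2, pvMk]
    simp [hfpos, hfneg, h1, h2]
  · have h2 : ¬ (b < 0) := by omega
    simp only [pvStep, if_pos h, ← hb, if_pos hbs, pvMk]
    simp [hfpos, hfneg, hbs, h2, min?_append_singleton, max?_append_singleton]

lemma fold_mk (iw : Bool) (mm : List (Int × Int)) (lo hi : Int) :
    ∀ (xs bal : List Int),
      xs.foldl (pvStep iw mm lo hi) (pvMk bal) =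
        pvMk (bal ++ (xs.filter (fun mn => decide (lo < mn ∧ mn ≤ hi))).map (fun mn => (if iw then 1 else -1) * pvLookupD mm mn))
  | [], bal => by simp
  | mn :: xs, bal => by
    by_cases h : lo < mn ∧ mn ≤ hi
    · simp only [List.foldl_cons, step_mk_in iw mm lo hi bal mn h, List.filter_cons, h,
        decide_true, if_true]
      rw [fold_mk iw mm lo hi xs (bal ++ [(if iw then 1 else -1) * pvLookupD mm mn])]
      simp
    · have hst : pvStep iw mm lo hi (pvMk bal) mn = pvMk bal := by
        simp [pvStep, h]
      simp only [List.foldl_cons, hst, List.filter_cons, h, decide_false]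
      exact fold_mk iw mm lo hi xs bal

lemma pvMk_nil : pvMk [] = ⟨0, 0, 0, none, none, none, none⟩ := rfl

lemma pvSignMul (iw : Bool) (x : Int) : (if iw then 1 else -1) * x = if iw then x else -x := by
  cases iw <;> simp

lemma pvMatchD (o : Option Int) : (match o with | some m => m | none => 0) = o.getD 0 := by
  cases o <;> rfl

-- ===== VERDICT (by name: the statement is the Claim_ definition above) =====
theorem material_after_blunder_py_spec : Claim_equal_material_after_blunder_py := by
  intro blunder_mn material_map is_white sorted_mns window _ _
  unfold Spec_material_after_blunder_py
  unfold material_after_blunder_py material_after_blunder_py_alt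
  rw [← pvMk_nil, fold_mk, List.nil_append]
  simp only [pvSignMul]
  set sub := sorted_mns.filter (fun mn => decide (blunder_mn < mn ∧ mn ≤ blunder_mn + window)) with hsub
  set ub := sub.map (fun mn => if is_white then pvLookupD material_map mn else -(pvLookupD material_map mn)) with hub
  by_cases hemp : sub = []
  · simp [hub, hemp, pvMk]
  · have h0 : ¬ ((pvMk ub).total = 0) := by
      simp only [pvMk, hub, List.length_map, Int.natCast_eq_zero, List.length_eq_zero_iff]
      exact hemp
    rw [if_neg hemp, if_neg h0]
    simp only [pvMk, pvMatchD, hub, List.length_map]
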